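-- pv_equiv track=rewrite | github.com/pypi-data/pypi-mirror-8 | packages/iepy/iepy-0.9.2.tar.gz/iepy-0.9.2/iepy/preprocess/stanford_preprocess.py | get_entity_occurrences
-- ===== SOURCE A (Python) =====
-- from itertools import chain, groupby
--
-- def get_entity_occurrences(sentences):
--     """
--     Returns a list of tuples (i, j, kind) such that `i` is the start
--     offset of an entity occurrence, `j` is the end offset and `kind` is the
--     entity kind of the entity.
--     """
--     found_entities = []
--     offset = 0
--     for words in sentences:
--         for kind, group in groupby(enumerate(words), key=lambda x: x[1]["NER"]):
--             if kind == "O":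
--                 continue
--             ix = [i for i, word in group]
--             i = ix[0] + offset
--             j = ix[-1] + 1 + offset
--             found_entities.append((i, j, kind))
--         offset += len(words)
--     return found_entities
-- ===== SOURCE B (Python) =====
-- def get_entity_occurrences(sentences):
--     """
--     Returns a list of tuples (i, j, kind) such that `i` is the start
--     offset of an entity occurrence, `j` is the end offset and `kind` is the
--     entity kind of the entity.
--     """
--     found_entities = []
--     offset = 0
--     for words in sentences:
--         tags = [w["NER"] for w in words]
--         prevs = [None] + tags[:-1]
--         nexts = tags[1:] + [None]
--         starts = [(i, t) for i, (t, p) in enumerate(zip(tags, prevs))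
--                   if t != "O" and t != p]
--         ends = [i + 1 for i, (t, nx) in enumerate(zip(tags, nexts))
--                 if t != "O" and t != nx]
--         found_entities.extend((s + offset, e + offset, t)
--                               for (s, t), e in zip(starts, ends))
--         offset += len(tags)
--     return found_entities
-- ===== Notes on version B (the rewrite author's own statement) =====
-- stated objective: alternative
-- what changed: Replaces the groupby run-grouping by two independent boundary-detection passes per sentence: compare each tag with shifted copies of the tag list ([None]+tags[:-1] and tags[1:]+[None]) to list entity start and end positions, then zip starts with ends to form the spans.
import Mathlib
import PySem

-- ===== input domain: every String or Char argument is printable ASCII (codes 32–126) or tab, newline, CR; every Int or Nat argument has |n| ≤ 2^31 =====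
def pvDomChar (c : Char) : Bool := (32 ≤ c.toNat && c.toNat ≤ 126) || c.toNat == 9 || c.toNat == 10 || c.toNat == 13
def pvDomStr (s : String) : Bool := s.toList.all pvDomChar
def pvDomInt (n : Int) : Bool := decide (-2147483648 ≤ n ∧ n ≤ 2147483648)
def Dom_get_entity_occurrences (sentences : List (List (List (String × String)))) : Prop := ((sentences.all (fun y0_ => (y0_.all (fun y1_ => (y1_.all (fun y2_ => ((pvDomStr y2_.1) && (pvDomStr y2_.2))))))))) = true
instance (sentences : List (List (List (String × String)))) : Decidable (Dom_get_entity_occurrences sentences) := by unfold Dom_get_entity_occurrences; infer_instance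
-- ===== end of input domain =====

-- B replaces the groupby run-grouping by two independent boundary-detection passes (compare each tag
-- with its shifted neighbours to list entity starts and ends, then zip them); same cost, different method.

-- ===== PORT A =====
-- word["NER"] (under Pre_ the key is always present, so the default is never read)
def pvNer (w : List (String × String)) : String := ((PySem.Dict.mk w).get? "NER").getD ""

-- itertools.groupby(enumerate(words), key=lambda x: x[1]["NER"]) : consecutive runs of equal key
def pvGroupby (l : List (Int × List (String × String))) : List (String × List (Int × List (String × String))) :=
  match l with
  | [] => []
  | x :: xs =>
    match pvGroupby xs with
    | [] => [(pvNer x.2, [x])]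
    | (k, g) :: rest =>
      if pvNer x.2 = k then (pvNer x.2, x :: g) :: rest
      else (pvNer x.2, [x]) :: (k, g) :: rest

def get_entity_occurrences (sentences : List (List (List (String × String)))) : List (Int × Int × String) :=
  (sentences.foldl (fun (st : List (Int × Int × String) × Int) words =>
      ((pvGroupby (PySem.List.enumerate words)).foldl (fun acc kg =>
          if kg.1 = "O" then acc
          else
            let ix := kg.2.map Prod.fst
            acc ++ [(ix.headD 0 + st.2, ix.getLastD 0 + 1 + st.2, kg.1)]) st.1,
       st.2 + (words.length : Int))) ([], 0)).1

-- ===== PORT B =====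
-- per Source B: tags = [w["NER"] for w in words]; prevs = [None] + tags[:-1]; nexts = tags[1:] + [None];
-- starts/ends by filtering enumerate(zip(...)); found.extend over zip(starts, ends)
def get_entity_occurrences_alt (sentences : List (List (List (String × String)))) : List (Int × Int × String) :=
  (sentences.foldl (fun (st : List (Int × Int × String) × Int) words =>
      let tags : List String := words.map pvNer
      let prevs : List (Option String) := [none] ++ (PySem.List.slice tags none (some (-1))).map some
      let nexts : List (Option String) := (PySem.List.slice tags (some 1) none).map some ++ [none]
      let starts := ((PySem.List.enumerate (tags.zip prevs)).filter
          (fun x => decide (x.2.1 ≠ "O" ∧ some x.2.1 ≠ x.2.2))).map (fun x => (x.1, x.2.1))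
      let ends := ((PySem.List.enumerate (tags.zip nexts)).filter
          (fun x => decide (x.2.1 ≠ "O" ∧ some x.2.1 ≠ x.2.2))).map (fun x => x.1 + 1)
      (st.1 ++ (starts.zip ends).map (fun q => (q.1.1 + st.2, q.2 + st.2, q.1.2)),
       st.2 + (tags.length : Int))) ([], 0)).1

-- ===== PRECONDITION & SPEC =====
-- Pre_ excludes exactly the inputs where some word dict lacks the "NER" key, on which the Python A
-- (and B) raises KeyError.
def Pre_get_entity_occurrences (sentences : List (List (List (String × String)))) : Prop :=
  (sentences.all (fun words => words.all (fun w => (PySem.Dict.mk w).contains "NER"))) = true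
instance (sentences : List (List (List (String × String)))) : Decidable (Pre_get_entity_occurrences sentences) := by
  unfold Pre_get_entity_occurrences; infer_instance

def pvWitness_get_entity_occurrences : (List (List (List (String × String)))) :=
  [[[("NER", "PER")], [("NER", "PER")], [("NER", "O")]], [[("NER", "LOC")]]]

def Spec_get_entity_occurrences (sentences : List (List (List (String × String)))) (out : List (Int × Int × String)) : Prop := out = get_entity_occurrences_alt sentences
instance (sentences : List (List (List (String × String)))) (out : List (Int × Int × String)) : Decidable (Spec_get_entity_occurrences sentences out) := by unfold Spec_get_entity_occurrences; infer_instance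

-- ===== CLAIM (what is proved, stated in full; the proofs are below) =====
def Claim_equal_get_entity_occurrences : Prop := ∀ (sentences : List (List (List (String × String)))), Dom_get_entity_occurrences sentences → Pre_get_entity_occurrences sentences → Spec_get_entity_occurrences sentences (get_entity_occurrences sentences)

-- ===== LEMMAS AND PROOFS =====

-- Abstract run decomposition of a sentence: (kind, start, end) with half-open [start, end), scanning from index i.
def pvRuns (i : Int) (ws : List (List (String × String))) : List (String × Int × Int) :=
  match ws with
  | [] => []
  | w :: rest =>
    match pvRuns (i + 1) rest with
    | [] => [(pvNer w, i, i + 1)]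
    | (k, s, e) :: tl =>
      if pvNer w = k then (pvNer w, i, e) :: tl
      else (pvNer w, i, i + 1) :: (k, s, e) :: tl

-- prepend an open run (kind k, started at s, currently reaching i) to a run list
def pvConsRun (k : String) (s i : Int) (rs : List (String × Int × Int)) : List (String × Int × Int) :=
  match rs with
  | [] => [(k, s, i)]
  | (k', s', e') :: tl => if k = k' then (k, s, e') :: tl else (k, s, i) :: (k', s', e') :: tl

-- emit the entity spans of a run list
def pvEmit (rs : List (String × Int × Int)) (offset : Int) : List (Int × Int × String) :=
  match rs with
  | [] => []
  | (k, s, e) :: tl => (if k = "O" then [] else [(s + offset, e + offset, k)]) ++ pvEmit tl offset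

-- summary of a groupby group as a run
def pvRunOf (p : String × List (Int × List (String × String))) : String × Int × Int :=
  (p.1, (p.2.map Prod.fst).headD 0, (p.2.map Prod.fst).getLastD 0 + 1)

theorem pvRuns_cons (w : List (String × String)) (rest : List (List (String × String))) (i : Int) :
    pvRuns i (w :: rest) = pvConsRun (pvNer w) i (i + 1) (pvRuns (i + 1) rest) := by
  cases h : pvRuns (i + 1) rest with
  | nil => simp [pvRuns, pvConsRun, h]
  | cons p tl =>
    obtain ⟨k, s, e⟩ := p
    by_cases hk : pvNer w = k <;> simp [pvRuns, pvConsRun, h, hk]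

theorem pvGroupby_groups_ne_nil (l : List (Int × List (String × String))) :
    ∀ p ∈ pvGroupby l, p.2 ≠ [] := by
  induction l with
  | nil => simp [pvGroupby]
  | cons x xs ih =>
    intro p hp
    cases h : pvGroupby xs with
    | nil =>
      simp only [pvGroupby, h] at hp
      simp at hp
      simp [hp]
    | cons q tl =>
      obtain ⟨k, g⟩ := q
      simp only [pvGroupby, h] at hp
      split_ifs at hp with hk
      · rcases List.mem_cons.mp hp with h1 | h2
        · subst h1; simp
        · exact ih p (h ▸ List.mem_cons_of_mem _ h2)
      · rcases List.mem_cons.mp hp with h1 | h2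
        · subst h1; simp
        · exact ih p (h ▸ h2)

theorem pvGroupby_enumerate (ws : List (List (String × String))) :
    ∀ i : Int, (pvGroupby (PySem.List.enumerate ws i)).map pvRunOf = pvRuns i ws := by
  induction ws with
  | nil => intro i; simp [PySem.List.enumerate_nil, pvGroupby, pvRuns]
  | cons w rest ih =>
    intro i
    rw [PySem.List.enumerate_cons]
    cases h : pvGroupby (PySem.List.enumerate rest (i + 1)) with
    | nil =>
      have h2 : pvRuns (i + 1) rest = [] := by rw [← ih (i + 1), h]; rfl
      simp [pvGroupby, pvRuns, h, h2, pvRunOf]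
    | cons q tl =>
      obtain ⟨k, g⟩ := q
      have hg : g ≠ [] := pvGroupby_groups_ne_nil _ (k, g) (h ▸ List.mem_cons_self ..)
      have hrest : pvRuns (i + 1) rest = pvRunOf (k, g) :: tl.map pvRunOf := by
        rw [← ih (i + 1), h]; rfl
      obtain ⟨g1, a, rfl⟩ := (List.eq_nil_or_concat g).resolve_left hg
      by_cases hk : pvNer w = k
      · simp [pvGroupby, pvRuns, h, hrest, hk, pvRunOf]
        rw [← List.cons_append, List.getLast?_concat]
        rfl
      · simp [pvGroupby, pvRuns, h, hrest, hk, pvRunOf]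

theorem pvFoldA (off : Int) (G : List (String × List (Int × List (String × String)))) :
    ∀ acc : List (Int × Int × String),
      G.foldl (fun acc kg =>
          if kg.1 = "O" then acc
          else
            let ix := kg.2.map Prod.fst
            acc ++ [(ix.headD 0 + off, ix.getLastD 0 + 1 + off, kg.1)]) acc
        = acc ++ pvEmit (G.map pvRunOf) off := by
  induction G with
  | nil => intro acc; simp [pvEmit]
  | cons p tl ih =>
    intro acc
    obtain ⟨k, g⟩ := p
    simp only [List.foldl_cons, List.map_cons]
    by_cases h : k = "O"
    · rw [if_pos h, ih]
      simp [pvEmit, pvRunOf, h]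
    · rw [if_neg h, ih]
      simp [pvEmit, pvRunOf, h]

-- ---- B side: boundary detection related to the run decomposition ----

-- recursive characterization of B's start / end comprehensions
def startsRec (p : Option String) (i : Int) (ts : List String) : List (Int × String) :=
  match ts with
  | [] => []
  | t :: ts => (if t ≠ "O" ∧ some t ≠ p then [(i, t)] else []) ++ startsRec (some t) (i + 1) ts

def endsRec (i : Int) (ts : List String) : List Int :=
  match ts with
  | [] => []
  | [t] => if t ≠ "O" then [i + 1] else []
  | t :: u :: ts => (if t ≠ "O" ∧ t ≠ u then [i + 1] else []) ++ endsRec (i + 1) (u :: ts)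

-- starts / ends read off a run list
def runStarts (p : Option String) (rs : List (String × Int × Int)) : List (Int × String) :=
  match rs with
  | [] => []
  | (k, s, _) :: tl => (if k ≠ "O" ∧ some k ≠ p then [(s, k)] else []) ++ runStarts (some k) tl

def runEnds (rs : List (String × Int × Int)) : List Int :=
  match rs with
  | [] => []
  | (k, _, e) :: tl => (if k ≠ "O" then [e] else []) ++ runEnds tl

theorem zip_prevs (ts : List String) : ∀ p : Option String,
    ts.zip (p :: ts.dropLast.map some) = ts.zip (p :: ts.map some) := by
  induction ts with
  | nil => intro p; rfl
  | cons t ts ih =>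
    intro p
    cases ts with
    | nil => rfl
    | cons u ts' =>
      show (t, p) :: (u :: ts').zip (some t :: (u :: ts').dropLast.map some)
          = (t, p) :: (u :: ts').zip (some t :: (u :: ts').map some)
      rw [ih (some t)]

theorem startsBridge (ts : List String) : ∀ (p : Option String) (i : Int),
    ((PySem.List.enumerate (ts.zip (p :: ts.map some)) i).filter
        (fun x => decide (x.2.1 ≠ "O" ∧ some x.2.1 ≠ x.2.2))).map (fun x => (x.1, x.2.1))
      = startsRec p i ts := by
  induction ts with
  | nil => intro p i; rfl
  | cons t ts ih =>
    intro p i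
    simp only [List.map_cons, List.zip_cons_cons, PySem.List.enumerate_cons, List.filter_cons,
      decide_eq_true_eq]
    by_cases h : t ≠ "O" ∧ some t ≠ p
    · rw [if_pos h]
      simp only [List.map_cons, startsRec, if_pos h, ih, List.cons_append, List.nil_append]
    · rw [if_neg h]
      simp only [startsRec, if_neg h, ih, List.nil_append]

theorem endsBridge (ts : List String) : ∀ i : Int,
    ((PySem.List.enumerate (ts.zip (ts.tail.map some ++ [none])) i).filter
        (fun x => decide (x.2.1 ≠ "O" ∧ some x.2.1 ≠ x.2.2))).map (fun x => x.1 + 1)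
      = endsRec i ts := by
  induction ts with
  | nil => intro i; rfl
  | cons t ts ih =>
    intro i
    cases ts with
    | nil =>
      by_cases h : t = "O" <;>
        simp [PySem.List.enumerate_cons, PySem.List.enumerate_nil, endsRec, h]
    | cons u ts' =>
      simp only [List.tail_cons, List.map_cons, List.cons_append, List.zip_cons_cons,
        PySem.List.enumerate_cons, List.filter_cons, decide_eq_true_eq]
      have hrw : (u :: ts').zip (ts'.map some ++ [none])
          = (u :: ts').zip ((u :: ts').tail.map some ++ [none]) := rfl
      by_cases h : t ≠ "O" ∧ t ≠ u
      · have hb : (t ≠ "O" ∧ some t ≠ some u) := ⟨h.1, by simpa using h.2⟩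
        rw [if_pos hb]
        simp only [List.map_cons, endsRec, if_pos h, List.cons_append, List.nil_append]
        rw [hrw, ih]
      · have hb : ¬ (t ≠ "O" ∧ some t ≠ some u) := by
          intro hc; exact h ⟨hc.1, by simpa using hc.2⟩
        rw [if_neg hb]
        simp only [endsRec, if_neg h, List.nil_append]
        rw [hrw, ih]

theorem startsRuns (ws : List (List (String × String))) : ∀ (i : Int) (p : Option String),
    startsRec p i (ws.map pvNer) = runStarts p (pvRuns i ws) := by
  induction ws with
  | nil => intro i p; rfl
  | cons w rest ih =>
    intro i p
    rw [pvRuns_cons]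
    simp only [List.map_cons, startsRec, ih (i + 1) (some (pvNer w))]
    cases h : pvRuns (i + 1) rest with
    | nil => simp [pvConsRun, runStarts]
    | cons q tl =>
      obtain ⟨k, s, e⟩ := q
      by_cases hk : pvNer w = k
      · subst hk
        simp [pvConsRun, runStarts]
      · simp [pvConsRun, hk, runStarts]

theorem pvRuns_head (w : List (String × String)) (ws : List (List (String × String))) (i : Int) :
    ∃ e tl, pvRuns i (w :: ws) = (pvNer w, i, e) :: tl := by
  rw [pvRuns_cons]
  cases h : pvRuns (i + 1) ws with
  | nil => exact ⟨i + 1, [], rfl⟩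
  | cons q tl =>
    obtain ⟨k, s, e⟩ := q
    by_cases hk : pvNer w = k
    · exact ⟨e, tl, by simp [pvConsRun, hk]⟩
    · exact ⟨i + 1, (k, s, e) :: tl, by simp [pvConsRun, hk]⟩

theorem endsRuns (ws : List (List (String × String))) : ∀ i : Int,
    endsRec i (ws.map pvNer) = runEnds (pvRuns i ws) := by
  induction ws with
  | nil => intro i; rfl
  | cons w rest ih =>
    intro i
    cases rest with
    | nil =>
      by_cases h : pvNer w = "O" <;> simp [endsRec, pvRuns, runEnds, h]
    | cons w' rest' =>
      obtain ⟨e, tl, hr⟩ := pvRuns_head w' rest' (i + 1)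
      rw [pvRuns_cons, hr]
      simp only [List.map_cons, endsRec]
      rw [show (pvNer w' :: rest'.map pvNer) = (w' :: rest').map pvNer from rfl, ih (i + 1), hr]
      by_cases hk : pvNer w = pvNer w'
      · simp [pvConsRun, hk, runEnds]
      · rw [show pvConsRun (pvNer w) i (i + 1) ((pvNer w', i + 1, e) :: tl)
            = (pvNer w, i, i + 1) :: (pvNer w', i + 1, e) :: tl by simp [pvConsRun, hk]]
        by_cases ho : pvNer w = "O" <;> simp [runEnds, hk, ho]

theorem zipEmit (rs : List (String × Int × Int)) : ∀ (p : Option String) (off : Int),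
    List.IsChain (fun a b => a.1 ≠ b.1) rs → (∀ x ∈ rs.head?, some x.1 ≠ p) →
    ((runStarts p rs).zip (runEnds rs)).map (fun q => (q.1.1 + off, q.2 + off, q.1.2))
      = pvEmit rs off := by
  induction rs with
  | nil => intro p off _ _; rfl
  | cons r tl ih =>
    intro p off hch hp
    obtain ⟨k, s, e⟩ := r
    have hpk : some k ≠ p := hp (k, s, e) rfl
    have hch' := (List.isChain_cons.mp hch)
    have hhd : ∀ x ∈ tl.head?, some x.1 ≠ some k := by
      intro x hx
      simpa using (hch'.1 x hx).symm
    by_cases h : k = "O"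
    · simp only [runStarts, runEnds, h, pvEmit]
      simp only [ne_eq, not_true_eq_false, false_and, if_false, List.nil_append]
      rw [ih (some "O") off hch'.2 (h ▸ hhd)]
      simp
    · simp only [runStarts, runEnds, pvEmit, if_neg h]
      have hc : (k ≠ "O" ∧ some k ≠ p) := ⟨h, hpk⟩
      simp only [if_pos hc, if_pos h, List.cons_append, List.nil_append, List.zip_cons_cons,
        List.map_cons]
      rw [ih (some k) off hch'.2 hhd]

theorem pvRuns_chain (ws : List (List (String × String))) : ∀ i : Int,
    List.IsChain (fun a b => a.1 ≠ b.1) (pvRuns i ws) := by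
  induction ws with
  | nil => intro i; exact List.isChain_nil
  | cons w rest ih =>
    intro i
    rw [pvRuns_cons]
    cases h : pvRuns (i + 1) rest with
    | nil => exact List.isChain_cons.mpr ⟨by simp, List.isChain_nil⟩
    | cons q tl =>
      obtain ⟨k, s, e⟩ := q
      have hch := h ▸ ih (i + 1)
      have hch' := List.isChain_cons.mp hch
      by_cases hk : pvNer w = k
      · subst hk
        simp only [pvConsRun]
        exact List.isChain_cons.mpr ⟨hch'.1, hch'.2⟩
      · simp only [pvConsRun, if_neg hk]
        exact List.isChain_cons.mpr ⟨by intro y hy; simp at hy; rw [← hy]; exact hk, hch⟩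

-- per-sentence equality of the two inner computations
theorem pvStep_eq (st : List (Int × Int × String) × Int) (words : List (List (String × String))) :
    ((pvGroupby (PySem.List.enumerate words)).foldl (fun acc kg =>
        if kg.1 = "O" then acc
        else
          let ix := kg.2.map Prod.fst
          acc ++ [(ix.headD 0 + st.2, ix.getLastD 0 + 1 + st.2, kg.1)]) st.1,
      st.2 + (words.length : Int))
    = (let tags : List String := words.map pvNer
       let prevs : List (Option String) := [none] ++ (PySem.List.slice tags none (some (-1))).map some
       let nexts : List (Option String) := (PySem.List.slice tags (some 1) none).map some ++ [none]
       let starts := ((PySem.List.enumerate (tags.zip prevs)).filter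
          (fun x => decide (x.2.1 ≠ "O" ∧ some x.2.1 ≠ x.2.2))).map (fun x => (x.1, x.2.1))
       let ends := ((PySem.List.enumerate (tags.zip nexts)).filter
          (fun x => decide (x.2.1 ≠ "O" ∧ some x.2.1 ≠ x.2.2))).map (fun x => x.1 + 1)
       (st.1 ++ (starts.zip ends).map (fun q => (q.1.1 + st.2, q.2 + st.2, q.1.2)),
        st.2 + (tags.length : Int))) := by
  simp only [PySem.List.slice_to_neg_one, PySem.List.slice_from_one, List.singleton_append]
  rw [zip_prevs, startsBridge, endsBridge, startsRuns, endsRuns,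
    zipEmit (pvRuns 0 words) none st.2 (pvRuns_chain words 0) (by intro x _; simp),
    pvFoldA, pvGroupby_enumerate words 0]
  simp

-- ===== VERDICT (by name: the statement is the Claim_ definition above) =====
theorem get_entity_occurrences_spec : Claim_equal_get_entity_occurrences := by
  intro sentences _ _
  unfold Spec_get_entity_occurrences get_entity_occurrences get_entity_occurrences_alt
  congr 1
  congr 1
  funext st words
  exact pvStep_eq st words
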